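-- pv_equiv track=rewrite | github.com/Strangemother/polypoint | py_tools/theatre_title_processing/add_titles.py | add_title_to_frontmatter
-- ===== SOURCE A (Python) =====
-- def add_title_to_frontmatter(frontmatter, title):
--     """Add title to frontmatter if it doesn't exist."""
--     if not frontmatter:
--         # Create new frontmatter
--         return f"title: {title}\n"
--
--     # Check if there's already a '---' separator or other structure
--     lines = frontmatter.split('\n')
--
--     # Insert title at the beginning (after any initial --- if present)
--     result_lines = []
--     title_added = False
--
--     for i, line in enumerate(lines):
--         if i == 0 and line.strip() == '---':
--             result_lines.append(line)
--             result_lines.append(f"title: {title}")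
--             title_added = True
--         elif not title_added and (line.strip().startswith('categories') or
--                                    line.strip().startswith('files:') or
--                                    line.strip().startswith('tags:') or
--                                    line.strip() == '---'):
--             result_lines.append(f"title: {title}")
--             result_lines.append(line)
--             title_added = True
--         else:
--             result_lines.append(line)
--
--     if not title_added:
--         result_lines.insert(0, f"title: {title}")
--
--     return '\n'.join(result_lines)
-- ===== SOURCE B (Python) =====
-- def _insert_before_marker(s, t):
--     """Recursively rebuild s with line t spliced in before its first marker
--     line; None if s contains no marker line."""
--     head, sep, rest = s.partition('\n')
--     h = head.strip()
--     if (h.startswith('categories') or h.startswith('files:')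
--             or h.startswith('tags:') or h == '---'):
--         return t + '\n' + s
--     if not sep:
--         return None
--     r = _insert_before_marker(rest, t)
--     return None if r is None else head + '\n' + r
--
--
-- def add_title_to_frontmatter(frontmatter, title):
--     """Add title to frontmatter if it doesn't exist."""
--     if not frontmatter:
--         return f"title: {title}\n"
--     t = f"title: {title}"
--     head, sep, rest = frontmatter.partition('\n')
--     if head.strip() == '---':
--         return head + '\n' + t + (('\n' + rest) if sep else '')
--     marked = _insert_before_marker(frontmatter, t)
--     return marked if marked is not None else t + '\n' + frontmatter
-- ===== Notes on version B (the rewrite author's own statement) =====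
-- stated objective: alternative
-- what changed: A splits the text into a list of lines and runs one imperative loop with a title_added flag that copies lines into a result list, then joins; B never builds a line list: it recursively descends over the raw string with str.partition('\n'), splicing the title line in by string concatenation (an Optional-returning recursive helper handles the insert-before-first-marker case).
import Mathlib
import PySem

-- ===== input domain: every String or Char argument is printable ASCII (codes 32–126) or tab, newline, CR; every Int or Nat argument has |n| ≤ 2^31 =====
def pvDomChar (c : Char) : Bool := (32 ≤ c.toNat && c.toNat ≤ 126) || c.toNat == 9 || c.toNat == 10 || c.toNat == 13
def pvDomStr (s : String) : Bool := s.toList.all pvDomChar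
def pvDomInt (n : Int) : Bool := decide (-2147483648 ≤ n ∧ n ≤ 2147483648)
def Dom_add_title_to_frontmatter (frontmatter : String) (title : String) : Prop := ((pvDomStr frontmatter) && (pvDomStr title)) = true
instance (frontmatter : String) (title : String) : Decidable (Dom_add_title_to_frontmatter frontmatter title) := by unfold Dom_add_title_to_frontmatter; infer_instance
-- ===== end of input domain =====

-- B replaces A's split-into-lines + flag-threaded copy loop + join by a recursive descent
-- over the raw string via partition('\n'), splicing the title in by concatenation (objective: alternative).

-- ===== PORT A =====
-- the big marker test of A's elif, on one line (code points)
def pvMarkerA (line : List Char) : Bool :=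
  PySem.Chars.startswith (PySem.Chars.strip line) "categories".toList ||
  PySem.Chars.startswith (PySem.Chars.strip line) "files:".toList ||
  PySem.Chars.startswith (PySem.Chars.strip line) "tags:".toList ||
  (PySem.Chars.strip line == "---".toList)

-- A's for-loop body over (i, line), state = (result_lines, title_added)
def pvStepA (tl : List Char) (st : List (List Char) × Bool) (p : Int × List Char) :
    List (List Char) × Bool :=
  if p.1 = 0 ∧ PySem.Chars.strip p.2 == "---".toList then (st.1 ++ [p.2, tl], true)
  else if ¬st.2 ∧ pvMarkerA p.2 then (st.1 ++ [tl, p.2], true)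
  else (st.1 ++ [p.2], st.2)

def add_title_to_frontmatter (frontmatter : String) (title : String) : String :=
  if frontmatter = "" then String.ofList ("title: ".toList ++ title.toList ++ ['\n'])
  else
    let lines := PySem.Chars.splitOn frontmatter.toList ['\n']
    let tl := "title: ".toList ++ title.toList
    let r := (PySem.List.enumerate lines).foldl (pvStepA tl) ([], false)
    let rl := if ¬r.2 then PySem.List.insert r.1 0 tl else r.1
    String.ofList (PySem.Chars.join ['\n'] rl)

-- ===== PORT B =====
-- exact port of s.partition('\n') for a one-character separator: the part before the
-- first '\n', and (some rest) iff a '\n' was found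
def pvPart : List Char → List Char × Option (List Char)
  | [] => ([], none)
  | c :: cs =>
    if c = '\n' then ([], some cs)
    else
      let p := pvPart cs
      (c :: p.1, p.2)

-- the rest returned by pvPart is shorter (termination of the recursive helper)
theorem pvPart_rest_lt : ∀ (s r : List Char), (pvPart s).2 = some r → r.length < s.length := by
  intro s
  induction s with
  | nil => intro r h; simp [pvPart] at h
  | cons c cs ih =>
    intro r h
    by_cases hc : c = '\n'
    · simp [pvPart, hc] at h; subst h; simp
    · simp only [pvPart, if_neg hc] at h
      exact Nat.lt_trans (ih r h) (by simp)

-- B's is_marker test on the stripped head (computed once)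
def pvIsMarkerB (h : List Char) : Bool :=
  let s := PySem.Chars.strip h
  PySem.Chars.startswith s "categories".toList || PySem.Chars.startswith s "files:".toList ||
  PySem.Chars.startswith s "tags:".toList || (s == "---".toList)

-- B's _insert_before_marker: recursively rebuild s with t spliced in before its
-- first marker line; none if s contains no marker line
def pvInsB (t : List Char) (s : List Char) : Option (List Char) :=
  if pvIsMarkerB (pvPart s).1 then some (t ++ '\n' :: s)
  else
    match hq : (pvPart s).2 with
    | none => none
    | some r => (pvInsB t r).map (fun x => (pvPart s).1 ++ '\n' :: x)
termination_by s.length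
decreasing_by exact pvPart_rest_lt s r hq

def add_title_to_frontmatter_alt (frontmatter : String) (title : String) : String :=
  if frontmatter = "" then String.ofList ("title: ".toList ++ title.toList ++ ['\n'])
  else
    let t := "title: ".toList ++ title.toList
    let cs := frontmatter.toList
    let p := pvPart cs
    if PySem.Chars.strip p.1 == "---".toList then
      String.ofList (p.1 ++ '\n' :: t ++ (match p.2 with | some r => '\n' :: r | none => []))
    else
      match pvInsB t cs with
      | some r => String.ofList r
      | none => String.ofList (t ++ '\n' :: cs)

-- ===== PRECONDITION & SPEC =====
def Spec_add_title_to_frontmatter (frontmatter : String) (title : String) (out : String) : Prop := out = add_title_to_frontmatter_alt frontmatter title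
instance (frontmatter : String) (title : String) (out : String) : Decidable (Spec_add_title_to_frontmatter frontmatter title out) := by unfold Spec_add_title_to_frontmatter; infer_instance

-- ===== CLAIM (what is proved, stated in full; the proofs are below) =====
def Claim_equal_add_title_to_frontmatter : Prop := ∀ (frontmatter : String) (title : String), Dom_add_title_to_frontmatter frontmatter title → Spec_add_title_to_frontmatter frontmatter title (add_title_to_frontmatter frontmatter title)

-- ===== LEMMAS AND PROOFS =====

theorem pvMarker_eq (l : List Char) : pvIsMarkerB l = pvMarkerA l := rfl

-- prepend a chunk onto the first part of a split
def pvConsHead (p : List Char) : List (List Char) → List (List Char)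
  | [] => [p]
  | x :: xs => (p ++ x) :: xs

theorem pvConsHead_consHead (p q : List Char) (xs : List (List Char)) :
    pvConsHead p (pvConsHead q xs) = pvConsHead (p ++ q) xs := by
  cases xs <;> simp [pvConsHead]

-- characterisation of splitOn's fuelled worker for the separator ['\n']
theorem pv_go_eq : ∀ (l : List Char) (fuel : Nat) (cur : List Char) (acc : List (List Char)),
    l.length < fuel →
    PySem.Chars.splitOn.go ['\n'] fuel l cur acc
      = acc.reverse ++ pvConsHead cur.reverse (PySem.Chars.splitOn l ['\n']) := by
  intro l
  induction l with
  | nil =>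
    intro fuel cur acc h
    obtain ⟨f, rfl⟩ : ∃ f, fuel = f + 1 := ⟨fuel - 1, by omega⟩
    rw [PySem.Chars.splitOn.go]
    · have h0 : PySem.Chars.splitOn ([] : List Char) ['\n'] = [[]] := rfl
      simp [h0, pvConsHead]
    · omega
  | cons c rest ih =>
    intro fuel cur acc h
    obtain ⟨f, rfl⟩ : ∃ f, fuel = f + 1 := ⟨fuel - 1, by omega⟩
    have hlen : rest.length < f := by simpa using h
    have hsplit : PySem.Chars.splitOn (c :: rest) ['\n']
        = if c = '\n' then [] :: pvConsHead [] (PySem.Chars.splitOn rest ['\n'])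
          else pvConsHead [c] (PySem.Chars.splitOn rest ['\n']) := by
      show PySem.Chars.splitOn.go ['\n'] (rest.length + 1 + 1) (c :: rest) [] [] = _
      rw [PySem.Chars.splitOn.go]
      by_cases hc : c = '\n'
      · have hp : List.isPrefixOf ['\n'] (c :: rest) = true := by simp [List.isPrefixOf, hc]
        rw [hp]
        simp only [if_true, List.length_singleton, List.drop_succ_cons, List.drop_zero,
          List.reverse_nil]
        rw [ih (rest.length + 1) [] [[]] (by omega), if_pos hc]
        simp
      · have hp : List.isPrefixOf ['\n'] (c :: rest) = false := by
          simp [List.isPrefixOf]; exact fun hh => (hc hh.symm).elim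
        rw [hp]
        simp only [Bool.false_eq_true, if_false]
        rw [ih (rest.length + 1) [c] [] (by omega), if_neg hc]
        simp
    rw [PySem.Chars.splitOn.go]
    by_cases hc : c = '\n'
    · have hp : List.isPrefixOf ['\n'] (c :: rest) = true := by simp [List.isPrefixOf, hc]
      rw [hp]
      simp only [if_true, List.length_singleton, List.drop_succ_cons, List.drop_zero,
        List.reverse_nil]
      rw [ih f [] (cur.reverse :: acc) hlen, hsplit, if_pos hc]
      simp [pvConsHead]
    · have hp : List.isPrefixOf ['\n'] (c :: rest) = false := by
        simp [List.isPrefixOf]; exact fun hh => (hc hh.symm).elim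
      rw [hp]
      simp only [Bool.false_eq_true, if_false]
      rw [ih f (c :: cur) acc hlen, hsplit, if_neg hc, pvConsHead_consHead]
      simp

-- splitOn by '\n' never returns []
theorem pv_splitOn_ne_nil (l : List Char) : PySem.Chars.splitOn l ['\n'] ≠ [] := by
  intro hnil
  have h2 : PySem.Chars.splitOn l ['\n']
      = ([] : List (List Char)).reverse
          ++ pvConsHead ([] : List Char).reverse (PySem.Chars.splitOn l ['\n']) :=
    pv_go_eq l (l.length + 1) [] [] (by omega)
  rw [hnil] at h2
  simp [pvConsHead] at h2

-- one unfolding step of splitOn by '\n'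
theorem pv_splitOn_cons (c : Char) (rest : List Char) :
    PySem.Chars.splitOn (c :: rest) ['\n']
      = if c = '\n' then [] :: PySem.Chars.splitOn rest ['\n']
        else pvConsHead [c] (PySem.Chars.splitOn rest ['\n']) := by
  show PySem.Chars.splitOn.go ['\n'] (rest.length + 1 + 1) (c :: rest) [] [] = _
  rw [PySem.Chars.splitOn.go]
  by_cases hc : c = '\n'
  · have hp : List.isPrefixOf ['\n'] (c :: rest) = true := by simp [List.isPrefixOf, hc]
    rw [hp]
    simp only [if_true, List.length_singleton, List.drop_succ_cons, List.drop_zero,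
      List.reverse_nil]
    rw [pv_go_eq rest (rest.length + 1) [] [[]] (by omega), if_pos hc]
    cases hr : PySem.Chars.splitOn rest ['\n'] with
    | nil => exact absurd hr (pv_splitOn_ne_nil rest)
    | cons x xs => simp [pvConsHead]
  · have hp : List.isPrefixOf ['\n'] (c :: rest) = false := by
      simp [List.isPrefixOf]; exact fun hh => (hc hh.symm).elim
    rw [hp]
    simp only [Bool.false_eq_true, if_false]
    rw [pv_go_eq rest (rest.length + 1) [c] [] (by omega), if_neg hc]
    simp

-- splitOn unfolds along pvPart
theorem pv_splitOn_part (cs : List Char) :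
    PySem.Chars.splitOn cs ['\n'] =
      match pvPart cs with
      | (h, none) => [h]
      | (h, some r) => h :: PySem.Chars.splitOn r ['\n'] := by
  induction cs with
  | nil => rfl
  | cons c rest ih =>
    rw [pv_splitOn_cons]
    by_cases hc : c = '\n'
    · rw [if_pos hc]
      simp [pvPart, hc]
    · rw [if_neg hc]
      simp only [pvPart, if_neg hc]
      rw [ih]
      rcases hp2 : pvPart rest with ⟨h2, r2⟩
      cases r2 <;> simp [pvConsHead]

-- pvPart really is "before first '\n' / after it"
theorem pv_part_append (cs : List Char) :
    cs = (pvPart cs).1 ++ (match (pvPart cs).2 with | none => [] | some r => '\n' :: r) := by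
  induction cs with
  | nil => simp [pvPart]
  | cons c rest ih =>
    by_cases hc : c = '\n'
    · simp [pvPart, hc]
    · simp only [pvPart, if_neg hc]
      exact congrArg (c :: ·) ih

-- join over cons with a nonempty tail
theorem pv_join_cons (x : List Char) (xs : List (List Char)) (hne : xs ≠ []) :
    PySem.Chars.join ['\n'] (x :: xs) = x ++ '\n' :: PySem.Chars.join ['\n'] xs := by
  cases xs with
  | nil => exact absurd rfl hne
  | cons y ys => simp [PySem.Chars.join, List.intercalate, List.intersperse]

theorem pv_join_singleton (x : List Char) :
    PySem.Chars.join ['\n'] [x] = x := by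
  simp [PySem.Chars.join, List.intercalate]

-- join ∘ splitOn = id
theorem pv_join_splitOn (cs : List Char) :
    PySem.Chars.join ['\n'] (PySem.Chars.splitOn cs ['\n']) = cs := by
  induction hn : cs.length using Nat.strong_induction_on generalizing cs with
  | _ n ih =>
    rw [pv_splitOn_part cs]
    rcases hp : pvPart cs with ⟨h, r?⟩
    have happ := pv_part_append cs
    rw [hp] at happ
    cases r? with
    | none =>
      rw [pv_join_singleton]
      simpa using happ.symm
    | some r =>
      have hlt : r.length < cs.length := pvPart_rest_lt cs r (by rw [hp])
      rw [pv_join_cons _ _ (pv_splitOn_ne_nil r), ih r.length (by omega) r rfl]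
      simpa using happ.symm

-- characterisation of B's recursive helper via findIdx? on the split lines
theorem pv_insB_eq (t : List Char) (cs : List Char) :
    pvInsB t cs =
      match (PySem.Chars.splitOn cs ['\n']).findIdx? pvMarkerA with
      | none => none
      | some i => some (PySem.Chars.join ['\n']
          ((PySem.Chars.splitOn cs ['\n']).take i ++ t :: (PySem.Chars.splitOn cs ['\n']).drop i)) := by
  induction hn : cs.length using Nat.strong_induction_on generalizing cs with
  | _ n ih =>
    rcases hp : pvPart cs with ⟨h, r?⟩
    have happ := pv_part_append cs
    rw [hp] at happ
    rw [pvInsB, hp, pv_splitOn_part cs, hp]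
    by_cases hm : pvIsMarkerB h = true
    · have hm' : pvMarkerA h = true := by rw [← pvMarker_eq]; exact hm
      cases r? with
      | none =>
        have hcs2 : cs = h := by simpa using happ
        simp only [hm, if_true, List.findIdx?_cons, hm', cond_true, List.take_zero,
          List.drop_zero, List.nil_append]
        rw [pv_join_cons _ _ (by simp), pv_join_singleton, hcs2]
      | some r =>
        have hcs2 : cs = h ++ '\n' :: r := by simpa using happ
        simp only [hm, if_true, List.findIdx?_cons, hm', cond_true, List.take_zero,
          List.drop_zero, List.nil_append]
        rw [pv_join_cons _ _ (by simp), pv_join_cons _ _ (pv_splitOn_ne_nil r),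
          pv_join_splitOn r, hcs2]
    · have hm' : pvMarkerA h = false := by rw [← pvMarker_eq]; simpa using hm
      simp only [hm, Bool.false_eq_true, if_false]
      cases r? with
      | none => simp [List.findIdx?_cons, hm']
      | some r =>
        have hlt : r.length < cs.length := pvPart_rest_lt cs r (by rw [hp])
        simp only [List.findIdx?_cons, hm', cond_false, Bool.false_eq_true, if_false,
          Option.map_some, Option.map_none]
        rw [ih r.length (by omega) r rfl]
        cases hf : (PySem.Chars.splitOn r ['\n']).findIdx? pvMarkerA with
        | none => simp
        | some i =>
          simp only [Option.map_some]
          rw [List.take_succ_cons, List.drop_succ_cons, List.cons_append,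
            pv_join_cons _ _ (by simp)]

-- A-side loop lemmas (the flag-threaded fold)
theorem pvStepA_true {tl x : List Char} {s : Int} (hs : s ≠ 0) (acc : List (List Char)) :
    pvStepA tl (acc, true) (s, x) = (acc ++ [x], true) := by
  simp only [pvStepA]
  rw [if_neg (by rintro ⟨h, -⟩; exact hs h)]
  simp

theorem pvStepA_false {tl x : List Char} {s : Int} (hs : s ≠ 0) (acc : List (List Char)) :
    pvStepA tl (acc, false) (s, x) =
      (if pvMarkerA x then (acc ++ [tl, x], true) else (acc ++ [x], false)) := by
  simp only [pvStepA]
  rw [if_neg (by rintro ⟨h, -⟩; exact hs h)]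
  by_cases hm : pvMarkerA x = true <;> simp [hm]

theorem pvFoldA_true (tl : List Char) (ls : List (List Char)) :
    ∀ (s : Int), 1 ≤ s → ∀ acc,
      (PySem.List.enumerate ls s).foldl (pvStepA tl) (acc, true) = (acc ++ ls, true) := by
  induction ls with
  | nil => intro s _ acc; simp [PySem.List.enumerate_nil]
  | cons x xs ih =>
    intro s hs acc
    rw [PySem.List.enumerate_cons, List.foldl_cons, pvStepA_true (by omega) acc,
      ih (s + 1) (by omega)]
    simp

theorem pvFoldA_false (tl : List Char) (ls : List (List Char)) :
    ∀ (s : Int), 1 ≤ s → ∀ acc,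
      (PySem.List.enumerate ls s).foldl (pvStepA tl) (acc, false) =
        match ls.findIdx? pvMarkerA with
        | none => (acc ++ ls, false)
        | some i => (acc ++ ls.take i ++ tl :: ls.drop i, true) := by
  induction ls with
  | nil => intro s _ acc; simp [PySem.List.enumerate_nil]
  | cons x xs ih =>
    intro s hs acc
    rw [PySem.List.enumerate_cons, List.foldl_cons, pvStepA_false (by omega) acc]
    by_cases hm : pvMarkerA x = true
    · rw [if_pos hm, pvFoldA_true tl xs (s + 1) (by omega)]
      simp [List.findIdx?_cons, hm]
    · rw [if_neg hm, ih (s + 1) (by omega)]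
      rw [List.findIdx?_cons]
      simp only [hm]
      cases h : xs.findIdx? pvMarkerA <;> simp

-- ===== VERDICT (by name: the statement is the Claim_ definition above) =====
theorem add_title_to_frontmatter_spec : Claim_equal_add_title_to_frontmatter := by
  intro fm title _
  unfold Spec_add_title_to_frontmatter add_title_to_frontmatter add_title_to_frontmatter_alt
  by_cases hfm : fm = ""
  · simp [hfm]
  · simp only [if_neg hfm]
    set t := "title: ".toList ++ title.toList with ht
    set cs := fm.toList with hcs
    rcases hp : pvPart cs with ⟨h, r?⟩
    have happ := pv_part_append cs
    rw [hp] at happ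
    cases r? with
    | none =>
      have hcs2 : cs = h := by simpa using happ
      have hlines : PySem.Chars.splitOn cs ['\n'] = [h] := by
        rw [pv_splitOn_part cs, hp]
      by_cases hd : (PySem.Chars.strip h == "---".toList) = true
      · -- head line is '---': A appends the title after it, B does too
        simp only [hp, hd, if_true]
        have hstep : pvStepA t ([], false) (0, h) = ([h, t], true) := by
          simp [pvStepA, (by simpa using hd : PySem.Chars.strip h = "---".toList)]
        rw [hlines, PySem.List.enumerate_cons, List.foldl_cons, hstep, PySem.List.enumerate_nil]
        simp only [List.foldl_nil, not_true, Bool.false_eq_true, if_false]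
        rw [pv_join_cons _ _ (by simp), pv_join_singleton]
        simp
      · -- no marker reachable except possibly h itself
        simp only [hp, hd, Bool.false_eq_true, if_false]
        have hd' : ¬((0 : Int) = 0 ∧ (PySem.Chars.strip h == "---".toList) = true) := by
          rintro ⟨-, hh⟩; rw [hh] at hd; exact hd rfl
        rw [pv_insB_eq t cs, hlines, PySem.List.enumerate_cons, List.foldl_cons,
          PySem.List.enumerate_nil]
        have hstep : pvStepA t ([], false) (0, h) =
            (if pvMarkerA h then ([t, h], true) else ([h], false)) := by
          have hd2 : ¬(PySem.Chars.strip h = ['-', '-', '-']) := by simpa using hd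
          by_cases hm : pvMarkerA h = true <;> simp [pvStepA, hd2, hm]
        rw [hstep]
        by_cases hm : pvMarkerA h = true
        · simp only [hm, if_true, List.foldl_nil, not_true, Bool.false_eq_true, if_false,
            List.findIdx?_cons, cond_true, List.take_zero, List.drop_zero, List.nil_append]
        · simp only [hm, Bool.false_eq_true, if_false, List.foldl_nil, not_false_iff, if_true,
            List.findIdx?_cons, cond_false, List.findIdx?_nil, Option.map_none]
          rw [PySem.List.insert_zero, pv_join_cons _ _ (by simp), pv_join_singleton, hcs2]
    | some r =>
      have hcs2 : cs = h ++ '\n' :: r := by simpa using happ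
      have hlines : PySem.Chars.splitOn cs ['\n'] = h :: PySem.Chars.splitOn r ['\n'] := by
        rw [pv_splitOn_part cs, hp]
      by_cases hd : (PySem.Chars.strip h == "---".toList) = true
      · -- head line is '---': A inserts right after it, B splices after the first partition
        simp only [hp, hd, if_true]
        have hstep : pvStepA t ([], false) (0, h) = ([h, t], true) := by
          simp [pvStepA, (by simpa using hd : PySem.Chars.strip h = "---".toList)]
        rw [hlines, PySem.List.enumerate_cons, List.foldl_cons, hstep,
          pvFoldA_true t _ (0 + 1) (by omega)]
        simp only [not_true, Bool.false_eq_true, if_false, List.cons_append, List.nil_append]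
        rw [pv_join_cons _ _ (by simp), pv_join_cons _ _ (pv_splitOn_ne_nil r), pv_join_splitOn r]
        simp
      · -- otherwise A's flag loop ≡ B's recursive insert-before-marker
        simp only [hp, hd, Bool.false_eq_true, if_false]
        have hd' : ¬((0 : Int) = 0 ∧ (PySem.Chars.strip h == "---".toList) = true) := by
          rintro ⟨-, hh⟩; rw [hh] at hd; exact hd rfl
        rw [pv_insB_eq t cs, hlines, PySem.List.enumerate_cons, List.foldl_cons]
        have hstep : pvStepA t ([], false) (0, h) =
            (if pvMarkerA h then ([t, h], true) else ([h], false)) := by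
          have hd2 : ¬(PySem.Chars.strip h = ['-', '-', '-']) := by simpa using hd
          by_cases hm : pvMarkerA h = true <;> simp [pvStepA, hd2, hm]
        rw [hstep]
        by_cases hm : pvMarkerA h = true
        · simp only [hm, if_true]
          rw [pvFoldA_true t _ (0 + 1) (by omega)]
          simp [List.findIdx?_cons, hm]
        · simp only [hm, Bool.false_eq_true, if_false]
          rw [pvFoldA_false t _ (0 + 1) (by omega), List.findIdx?_cons]
          simp only [hm, Bool.not_eq_true, Bool.false_eq_true, if_false, not_false_iff,
            if_true]
          cases hf : (PySem.Chars.splitOn r ['\n']).findIdx? pvMarkerA with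
          | none =>
            simp only [hf, Option.map_none, List.singleton_append, if_true]
            rw [PySem.List.insert_zero, pv_join_cons _ _ (by simp),
              pv_join_cons _ _ (pv_splitOn_ne_nil r), pv_join_splitOn r, hcs2]
          | some i =>
            simp only [hf, Option.map_some, List.singleton_append, List.take_succ_cons,
              List.drop_succ_cons, List.cons_append, Bool.true_eq_false, if_false,
              List.nil_append]
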